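-- pv_equiv track=rewrite | github.com/codefuse-ai/codefuse-evaluation | codefuseEval_202503/post_processor/mbxp_open_coder_chat_postprocessor.py | dealts
-- ===== SOURCE A (Python) =====
-- def dealts(text, data):
--     if text.startswith(("javascript", "typescript")):
--         text = text[11:]
--     if text.startswith(("js", "ts")):
--         text = text[3:]
--     lines = text.split("\n")
--     new_lines = []
--     area_continue = False
--     for line in lines:
--         if area_continue:
--             if line.strip().startswith("*/"):
--                 area_continue = False
--                 continue
--             else:
--                 continue
--         if "console.log" in line:
--             continue
--         if line.strip().startswith("/*"):
--             area_continue = True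
--             continue
--         if line.strip().startswith("//"):
--             continue
--         if not line.startswith((" ", "\t", "}", "function", "const", "import")):
--             continue
--         if "import * as assert from 'assert'" in line:
--             if any([data["entry_point"] in line for line in new_lines]):
--                 break
--             else:
--                 continue
--         new_lines.append(line)
--         temp_code = "\n".join(new_lines).strip()
--         if temp_code.count("}") - temp_code.count("{") == 1:
--             break
--     new_code = "\n".join(new_lines).strip()
--     if new_code.startswith("}"):
--         new_code = new_code[1:]
--     return new_code
-- ===== SOURCE B (Python) =====
-- def dealts(text, data):
--     if text.startswith(("javascript", "typescript")):
--         text = text[11:]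
--     if text.startswith(("js", "ts")):
--         text = text[3:]
--     entry = data.get("entry_point")
--     kept = []
--     depth = 0          # running count('}') - count('{') over kept lines
--     seen = False       # some kept line contains entry
--     in_block = False   # inside a /* ... */ comment
--     for line in text.split("\n"):
--         s = line.strip()
--         if in_block:
--             in_block = not s.startswith("*/")
--             continue
--         if "console.log" in line:
--             continue
--         if s.startswith("/*"):
--             in_block = True
--             continue
--         if s.startswith("//"):
--             continue
--         if not line.startswith((" ", "\t", "}", "function", "const", "import")):
--             continue
--         if "import * as assert from 'assert'" in line:
--             if seen:
--                 break
--             continue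
--         kept.append(line)
--         depth += line.count("}") - line.count("{")
--         if entry is not None and entry in line:
--             seen = True
--         if depth == 1:
--             break
--     code = "\n".join(kept).strip()
--     return code[1:] if code.startswith("}") else code
-- ===== Notes on version B (the rewrite author's own statement) =====
-- stated objective: alternative
-- what changed: B keeps an incremental brace-balance counter and a seen-entry-point flag across a single pass, instead of A's per-kept-line rejoin of all kept lines, restrip, two full substring recounts and rescan of every kept line for the entry point.
-- outside the precondition, e.g. on dealts("import * as assert from 'assert'", {}): A returns '', B returns ''
import Mathlib
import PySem

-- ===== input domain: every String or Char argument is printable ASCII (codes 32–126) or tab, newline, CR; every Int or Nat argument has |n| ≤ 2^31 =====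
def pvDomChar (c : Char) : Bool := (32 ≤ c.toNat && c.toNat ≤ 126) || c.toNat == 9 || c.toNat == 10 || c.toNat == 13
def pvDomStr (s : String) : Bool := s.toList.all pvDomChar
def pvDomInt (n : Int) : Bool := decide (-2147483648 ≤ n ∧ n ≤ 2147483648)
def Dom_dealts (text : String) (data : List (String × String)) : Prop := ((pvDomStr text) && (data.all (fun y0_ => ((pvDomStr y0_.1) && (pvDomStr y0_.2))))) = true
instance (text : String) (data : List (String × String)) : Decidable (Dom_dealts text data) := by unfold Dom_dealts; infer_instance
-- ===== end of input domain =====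

-- B replaces A's per-kept-line rejoin + restrip + two substring recounts + rescan of all kept lines
-- by an incremental brace-balance counter and a seen-flag kept across one pass (objective: alternative).

-- ===== PORT A =====
-- the two prefix trims at the top of A
def dealtsTrim2A (t : String) : String :=
  if PySem.Str.startswith t "js" || PySem.Str.startswith t "ts" then PySem.Str.slice t (some 3) none else t
def dealtsTrimA (text : String) : String :=
  dealtsTrim2A (if PySem.Str.startswith text "javascript" || PySem.Str.startswith text "typescript" then PySem.Str.slice text (some 11) none else text)

-- A's per-line loop: state (new_lines, area_continue); returns the final new_lines (break ends the recursion)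
def dealtsLoopA (data : List (String × String)) : List String → List String → Bool → List String
  | [], new_lines, _ => new_lines
  | line :: rest, new_lines, area_continue =>
    if area_continue then
      if PySem.Str.startswith (PySem.Str.strip line) "*/" then
        dealtsLoopA data rest new_lines false
      else
        dealtsLoopA data rest new_lines true
    else if PySem.Str.isIn "console.log" line then
      dealtsLoopA data rest new_lines area_continue
    else if PySem.Str.startswith (PySem.Str.strip line) "/*" then
      dealtsLoopA data rest new_lines true
    else if PySem.Str.startswith (PySem.Str.strip line) "//" then
      dealtsLoopA data rest new_lines area_continue
    else if !(PySem.Str.startswith line " " || PySem.Str.startswith line "\t" || PySem.Str.startswith line "}" || PySem.Str.startswith line "function" || PySem.Str.startswith line "const" || PySem.Str.startswith line "import") then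
      dealtsLoopA data rest new_lines area_continue
    else if PySem.Str.isIn "import * as assert from 'assert'" line then
      -- data["entry_point"]: Python raises KeyError when the key is missing and new_lines ≠ [] — excluded by Pre_;
      -- the getD "" default is only reachable with new_lines = [] inside Pre_, where any [] is False anyway
      if new_lines.any (fun l => PySem.Str.isIn ((PySem.Dict.get? ⟨data⟩ "entry_point").getD "") l) then
        new_lines
      else
        dealtsLoopA data rest new_lines area_continue
    else
      let new_lines' := new_lines ++ [line]
      let temp_code := PySem.Str.strip (PySem.Str.join "\n" new_lines')
      if ((PySem.Str.count temp_code "}" : Int) - (PySem.Str.count temp_code "{" : Int)) == 1 then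
        new_lines'
      else
        dealtsLoopA data rest new_lines' area_continue

-- A after the loop: rejoin, strip, drop one leading "}"
def dealtsFinishA (new_lines : List String) : String :=
  let new_code := PySem.Str.strip (PySem.Str.join "\n" new_lines)
  if PySem.Str.startswith new_code "}" then PySem.Str.slice new_code (some 1) none else new_code

def dealts (text : String) (data : List (String × String)) : String :=
  dealtsFinishA (dealtsLoopA data ((PySem.Str.split? (dealtsTrimA text) "\n").getD []) [] false)
  -- split? with sep "\n" ≠ "" is always some

-- ===== PORT B =====
def dealtsTrim2B (t : String) : String :=
  if PySem.Str.startswith t "js" || PySem.Str.startswith t "ts" then PySem.Str.slice t (some 3) none else t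
def dealtsTrimB (text : String) : String :=
  dealtsTrim2B (if PySem.Str.startswith text "javascript" || PySem.Str.startswith text "typescript" then PySem.Str.slice text (some 11) none else text)

-- B's single pass: state (kept, depth = running '}'-'{' balance, seen = some kept line contains entry, in_block)
def dealtsLoopB (entry : Option String) : List String → List String → Int → Bool → Bool → List String
  | [], kept, _, _, _ => kept
  | line :: rest, kept, depth, seen, in_block =>
    let s := PySem.Str.strip line
    if in_block then
      dealtsLoopB entry rest kept depth seen (!(PySem.Str.startswith s "*/"))
    else if PySem.Str.isIn "console.log" line then
      dealtsLoopB entry rest kept depth seen false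
    else if PySem.Str.startswith s "/*" then
      dealtsLoopB entry rest kept depth seen true
    else if PySem.Str.startswith s "//" then
      dealtsLoopB entry rest kept depth seen false
    else if !(PySem.Str.startswith line " " || PySem.Str.startswith line "\t" || PySem.Str.startswith line "}" || PySem.Str.startswith line "function" || PySem.Str.startswith line "const" || PySem.Str.startswith line "import") then
      dealtsLoopB entry rest kept depth seen false
    else if PySem.Str.isIn "import * as assert from 'assert'" line then
      if seen then kept else dealtsLoopB entry rest kept depth seen false
    else
      let kept' := kept ++ [line]
      let depth' := depth + ((PySem.Str.count line "}" : Int) - (PySem.Str.count line "{" : Int))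
      let seen' := match entry with
        | some e => if PySem.Str.isIn e line then true else seen
        | none => seen
      if depth' == 1 then kept' else dealtsLoopB entry rest kept' depth' seen' false

def dealtsFinishB (kept : List String) : String :=
  let code := PySem.Str.strip (PySem.Str.join "\n" kept)
  if PySem.Str.startswith code "}" then PySem.Str.slice code (some 1) none else code

def dealts_alt (text : String) (data : List (String × String)) : String :=
  dealtsFinishB (dealtsLoopB (PySem.Dict.get? ⟨data⟩ "entry_point")   -- data.get("entry_point")
    ((PySem.Str.split? (dealtsTrimB text) "\n").getD []) [] 0 false false)

-- ===== PRECONDITION & SPEC =====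
-- Pre_ excludes inputs whose text contains the assert-import marker while data lacks an "entry_point" key:
-- on (some of) those A raises KeyError (slightly conservative: when the marker line is filtered out earlier,
-- or no line was kept yet, A still returns — see the cite in the claim; B returns the same value there).
def Pre_dealts (text : String) (data : List (String × String)) : Prop :=
  (PySem.Dict.get? (⟨data⟩ : PySem.Dict String String) "entry_point").isSome = true
    ∨ PySem.Str.isIn "import * as assert from 'assert'" text = false
instance (text : String) (data : List (String × String)) : Decidable (Pre_dealts text data) := by unfold Pre_dealts; infer_instance
def pvWitness_dealts : String × (List (String × String)) :=
  ("function f() {\n  return 1;\n}", [("entry_point", "f")])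

def Spec_dealts (text : String) (data : List (String × String)) (out : String) : Prop := out = dealts_alt text data
instance (text : String) (data : List (String × String)) (out : String) : Decidable (Spec_dealts text data out) := by unfold Spec_dealts; infer_instance

-- ===== CLAIM (what is proved, stated in full; the proofs are below) =====
def Claim_equal_dealts : Prop := ∀ (text : String) (data : List (String × String)), Dom_dealts text data → Pre_dealts text data → Spec_dealts text data (dealts text data)

-- ===== LEMMAS AND PROOFS =====

lemma count_go_single (c : Char) : ∀ (fuel : Nat) (s : List Char) (acc : Nat), s.length ≤ fuel →
    PySem.Chars.count.go [c] fuel s acc = acc + s.count c := by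
  intro fuel
  induction fuel with
  | zero =>
    intro s acc h
    cases s with
    | nil => simp [PySem.Chars.count.go]
    | cons x t => simp at h
  | succ n ih =>
    intro s acc h
    cases s with
    | nil => simp [PySem.Chars.count.go]
    | cons x t =>
      simp only [PySem.Chars.count.go]
      by_cases hx : x = c
      · subst hx
        simp [List.isPrefixOf, ih t (acc + 1) (by simpa using h)]
        omega
      · simp [List.isPrefixOf, hx, ih t acc (by simpa using h), Ne.symm hx]

lemma chars_count_single (c : Char) (s : List Char) : PySem.Chars.count s [c] = s.count c := by
  simp [PySem.Chars.count, count_go_single c s.length s 0 le_rfl]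

lemma chars_count_strip (c : Char) (hc : PySem.Chars.isspace c = false) (s : List Char) :
    (PySem.Chars.strip s).count c = s.count c := by
  have hdrop : ∀ t : List Char, (List.dropWhile PySem.Chars.isspace t).count c = t.count c := by
    intro t
    conv_rhs => rw [← List.takeWhile_append_dropWhile (p := PySem.Chars.isspace) (l := t)]
    rw [List.count_append]
    have : (List.takeWhile PySem.Chars.isspace t).count c = 0 := by
      rw [List.count_eq_zero]
      intro hmem
      have := List.mem_takeWhile_imp hmem
      rw [hc] at this
      exact Bool.false_ne_true this
    omega
  simp [PySem.Chars.strip, PySem.Chars.rstrip, PySem.Chars.lstrip, List.count_reverse, hdrop]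

lemma chars_count_join_snoc (sep : List Char) (c : Char) (hsep : sep.count c = 0) :
    ∀ (xs : List (List Char)) (l : List Char),
      (PySem.Chars.join sep (xs ++ [l])).count c = (PySem.Chars.join sep xs).count c + l.count c := by
  intro xs
  induction xs with
  | nil => intro l; simp [PySem.Chars.join_singleton, PySem.Chars.join_nil]
  | cons x xs ih =>
    intro l
    cases xs with
    | nil =>
      simp [PySem.Chars.join_cons_cons, PySem.Chars.join_singleton, List.count_append, hsep]
    | cons y ys =>
      have h1 : (x :: (y :: ys)) ++ [l] = x :: ((y :: ys) ++ [l]) := by simp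
      rw [h1]
      have h2 : (y :: ys) ++ [l] = y :: (ys ++ [l]) := by simp
      rw [h2, PySem.Chars.join_cons_cons, ← h2, PySem.Chars.join_cons_cons]
      simp only [List.count_append, ih l]
      omega

-- the brace balance is unchanged by strip (braces are not whitespace)
lemma bd_strip (s : String) :
    ((PySem.Str.count (PySem.Str.strip s) "}" : Int) - (PySem.Str.count (PySem.Str.strip s) "{" : Int))
    = ((PySem.Str.count s "}" : Int) - (PySem.Str.count s "{" : Int)) := by
  have h1 : ("}" : String).toList = ['}'] := rfl
  have h2 : ("{" : String).toList = ['{'] := rfl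
  simp only [PySem.Str.count_eq, PySem.Str.toList_strip, h1, h2, chars_count_single]
  rw [chars_count_strip '}' (by decide), chars_count_strip '{' (by decide)]

-- the brace balance of the rejoined code advances by exactly the appended line's balance
lemma bd_join_snoc (acc : List String) (line : String) :
    ((PySem.Str.count (PySem.Str.join "\n" (acc ++ [line])) "}" : Int)
      - (PySem.Str.count (PySem.Str.join "\n" (acc ++ [line])) "{" : Int))
    = ((PySem.Str.count (PySem.Str.join "\n" acc) "}" : Int) - (PySem.Str.count (PySem.Str.join "\n" acc) "{" : Int))
      + ((PySem.Str.count line "}" : Int) - (PySem.Str.count line "{" : Int)) := by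
  have h1 : ("}" : String).toList = ['}'] := rfl
  have h2 : ("{" : String).toList = ['{'] := rfl
  have h3 : ("\n" : String).toList = ['\n'] := rfl
  simp only [PySem.Str.count_eq, PySem.Str.toList_join, h1, h2, h3, chars_count_single, List.map_append, List.map_cons, List.map_nil]
  rw [chars_count_join_snoc ['\n'] '}' (by decide), chars_count_join_snoc ['\n'] '{' (by decide)]
  push_cast
  ring

lemma bd_snoc (acc : List String) (line : String) :
    ((PySem.Str.count (PySem.Str.strip (PySem.Str.join "\n" (acc ++ [line]))) "}" : Int)
      - (PySem.Str.count (PySem.Str.strip (PySem.Str.join "\n" (acc ++ [line]))) "{" : Int))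
    = ((PySem.Str.count (PySem.Str.join "\n" acc) "}" : Int) - (PySem.Str.count (PySem.Str.join "\n" acc) "{" : Int))
      + ((PySem.Str.count line "}" : Int) - (PySem.Str.count line "{" : Int)) := by
  rw [bd_strip, bd_join_snoc]

-- every piece produced by Python's str.split is a contiguous substring of the split string
lemma splitOn_go_infix (sep s : List Char) :
    ∀ (fuel : Nat) (l cur : List Char) (acc : List (List Char)),
      (∀ p ∈ acc, p <:+: s) → (cur.reverse ++ l) <:+: s →
      ∀ p ∈ PySem.Chars.splitOn.go sep fuel l cur acc, p <:+: s := by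
  intro fuel
  induction fuel with
  | zero =>
    intro l cur acc hacc hcurl p hp
    simp only [PySem.Chars.splitOn.go, List.mem_reverse, List.mem_cons] at hp
    rcases hp with h | h
    · subst h; exact hcurl
    · exact hacc p h
  | succ n ih =>
    intro l cur acc hacc hcurl p hp
    cases l with
    | nil =>
      simp only [PySem.Chars.splitOn.go, List.mem_reverse, List.mem_cons] at hp
      rcases hp with h | h
      · subst h
        exact (List.prefix_append cur.reverse []).isInfix.trans (by simpa using hcurl)
      · exact hacc p h
    | cons c rest =>
      simp only [PySem.Chars.splitOn.go] at hp
      by_cases hpre : sep.isPrefixOf (c :: rest) = true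
      · rw [if_pos hpre] at hp
        refine ih (List.drop sep.length (c :: rest)) [] (cur.reverse :: acc) ?_ ?_ p hp
        · intro q hq
          rcases List.mem_cons.mp hq with h | h
          · subst h
            exact (List.prefix_append cur.reverse (c :: rest)).isInfix.trans hcurl
          · exact hacc q h
        · exact ((List.drop_suffix _ _).isInfix.trans
            ((List.suffix_append cur.reverse (c :: rest)).isInfix.trans hcurl))
      · rw [if_neg hpre] at hp
        refine ih rest (c :: cur) acc hacc ?_ p hp
        simpa using hcurl

lemma splitOn_infix (s sep : List Char) : ∀ p ∈ PySem.Chars.splitOn s sep, p <:+: s := by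
  intro p hp
  exact splitOn_go_infix sep s (s.length + 1) s [] [] (by simp) (by simp) p hp

-- a [a:]-slice of a string is a contiguous substring of it
lemma slice_from_infix (s : String) (k : Int) :
    (PySem.Str.slice s (some k) none).toList <:+: s.toList := by
  rw [PySem.Str.toList_slice, PySem.Chars.slice_eq_listSlice, PySem.List.slice_some_none]
  exact (List.drop_suffix _ _).isInfix

lemma trim_infix (text : String) : (dealtsTrimA text).toList <:+: text.toList := by
  unfold dealtsTrimA dealtsTrim2A
  split_ifs with h1 h2 h3
  · exact (slice_from_infix _ 3).trans (slice_from_infix text 11)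
  · exact slice_from_infix text 11
  · exact slice_from_infix text 3
  · exact List.infix_refl _

-- if the marker is not in the text, it is in no line of the (trimmed, split) text
lemma lines_no_marker (text : String)
    (hno : PySem.Str.isIn "import * as assert from 'assert'" text = false) :
    ∀ l ∈ (PySem.Str.split? (dealtsTrimA text) "\n").getD [],
      PySem.Str.isIn "import * as assert from 'assert'" l = false := by
  intro l hl
  by_contra hcon
  rw [Bool.not_eq_false, PySem.Str.isIn_iff_infix] at hcon
  simp only [PySem.Str.split?] at hl
  have hspl : PySem.Chars.split? (dealtsTrimA text).toList (("\n" : String).toList)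
      = some (PySem.Chars.splitOn (dealtsTrimA text).toList ['\n']) := rfl
  rw [hspl] at hl
  simp only [Option.map_some, Option.getD_some, List.mem_map] at hl
  obtain ⟨p, hp, hlp⟩ := hl
  have hps : p <:+: (dealtsTrimA text).toList := splitOn_infix _ _ p hp
  have : ("import * as assert from 'assert'" : String).toList <:+: text.toList := by
    subst hlp
    simp only [String.toList_ofList] at hcon
    exact (hcon.trans hps).trans (trim_infix text)
  rw [← PySem.Str.isIn_iff_infix, hno] at this
  exact Bool.false_ne_true this

lemma loop_eq (data : List (String × String)) :
    ∀ (lines acc : List String) (area : Bool) (depth : Int) (seen : Bool),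
      depth = ((PySem.Str.count (PySem.Str.join "\n" acc) "}" : Int)
                - (PySem.Str.count (PySem.Str.join "\n" acc) "{" : Int)) →
      ((PySem.Dict.get? (⟨data⟩ : PySem.Dict String String) "entry_point").isSome = true →
        seen = acc.any (fun l => PySem.Str.isIn ((PySem.Dict.get? ⟨data⟩ "entry_point").getD "") l)) →
      ((PySem.Dict.get? (⟨data⟩ : PySem.Dict String String) "entry_point") = none →
        ∀ l ∈ lines, PySem.Str.isIn "import * as assert from 'assert'" l = false) →
      dealtsLoopA data lines acc area
        = dealtsLoopB (PySem.Dict.get? ⟨data⟩ "entry_point") lines acc depth seen area := by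
  intro lines
  induction lines with
  | nil => intro acc area depth seen hd hs hm; simp [dealtsLoopA, dealtsLoopB]
  | cons line rest ih =>
    intro acc area depth seen hd hs hm
    have hm' : (PySem.Dict.get? (⟨data⟩ : PySem.Dict String String) "entry_point") = none →
        ∀ l ∈ rest, PySem.Str.isIn "import * as assert from 'assert'" l = false :=
      fun he l hl => hm he l (List.mem_cons_of_mem line hl)
    simp only [dealtsLoopA, dealtsLoopB]
    cases area with
    | true =>
      cases hsw : PySem.Str.startswith (PySem.Str.strip line) "*/" with
      | true => simp only; exact ih acc false depth seen hd hs hm'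
      | false => simp only; exact ih acc true depth seen hd hs hm'
    | false =>
      simp only [Bool.false_eq_true]
      by_cases h1 : PySem.Str.isIn "console.log" line = true
      · simp only [h1, if_true]; exact ih acc false depth seen hd hs hm'
      · simp only [h1]
        by_cases h2 : PySem.Str.startswith (PySem.Str.strip line) "/*" = true
        · simp only [h2, if_true]; exact ih acc true depth seen hd hs hm'
        · simp only [h2]
          by_cases h3 : PySem.Str.startswith (PySem.Str.strip line) "//" = true
          · simp only [h3, if_true]; exact ih acc false depth seen hd hs hm'
          · simp only [h3]
            by_cases h4 : (!(PySem.Str.startswith line " " || PySem.Str.startswith line "\t" || PySem.Str.startswith line "}" || PySem.Str.startswith line "function" || PySem.Str.startswith line "const" || PySem.Str.startswith line "import")) = true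
            · simp only [h4, if_true]; exact ih acc false depth seen hd hs hm'
            · simp only [h4]
              by_cases h5 : PySem.Str.isIn "import * as assert from 'assert'" line = true
              · -- the marker branch: Pre_ guarantees the key is present here
                have hsome : (PySem.Dict.get? (⟨data⟩ : PySem.Dict String String) "entry_point").isSome = true := by
                  cases hk : PySem.Dict.get? (⟨data⟩ : PySem.Dict String String) "entry_point" with
                  | none => rw [hm hk line (List.mem_cons_self)] at h5; exact absurd h5 (by simp)
                  | some e => rfl
                simp only [h5, if_true, ← hs hsome]
                cases seen with
                | true => simp
                | false => simp only [Bool.false_eq_true]; exact ih acc false depth false hd hs hm'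
              · simp only [h5]
                have hdep : depth + ((PySem.Str.count line "}" : Int) - (PySem.Str.count line "{" : Int))
                    = ((PySem.Str.count (PySem.Str.strip (PySem.Str.join "\n" (acc ++ [line]))) "}" : Int)
                        - (PySem.Str.count (PySem.Str.strip (PySem.Str.join "\n" (acc ++ [line]))) "{" : Int)) := by
                  rw [bd_snoc, hd]
                by_cases h6 : (((PySem.Str.count (PySem.Str.strip (PySem.Str.join "\n" (acc ++ [line]))) "}" : Int)
                    - (PySem.Str.count (PySem.Str.strip (PySem.Str.join "\n" (acc ++ [line]))) "{" : Int)) == 1) = true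
                · simp only [hdep, h6, if_true]
                  simp
                · simp only [hdep, h6]
                  apply ih _ _ _ _ (by rw [bd_strip]) _ hm'
                  intro hsome
                  rw [hs hsome]
                  cases hk : PySem.Dict.get? (⟨data⟩ : PySem.Dict String String) "entry_point" with
                  | none => rw [hk] at hsome; exact absurd hsome (by simp)
                  | some e =>
                    simp only [Option.getD_some, List.any_append, List.any_cons, List.any_nil, Bool.or_false]
                    cases hf : PySem.Str.isIn e line with
                    | true => simp
                    | false => simp

-- ===== VERDICT (by name: the statement is the Claim_ definition above) =====
theorem dealts_spec : Claim_equal_dealts := by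
  intro text data _ hpre
  unfold Spec_dealts dealts dealts_alt
  rw [show dealtsTrimB text = dealtsTrimA text from rfl,
      show dealtsFinishB = dealtsFinishA from rfl]
  refine congrArg dealtsFinishA (loop_eq data _ [] false 0 false (by decide) (fun _ => rfl) ?_)
  intro hnone l hl
  rcases hpre with hk | hno
  · rw [hnone] at hk; exact absurd hk (by simp)
  · exact lines_no_marker text hno l hl
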